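-- pv_equiv track=rewrite | github.com/muskanmahajan37/FEC | FEC.py | make_packets
-- ===== SOURCE A (Python) =====
-- packet_length = 8 #min 4, koduje tylko dla długości 2^n
--
-- def make_packets(bits):
--     packets = []
--     packet = []
--     index = 0
--
--     while index < (len(bits)):
--         if len(packet) < packet_length:
--             bit = bits[index]
--             packet.append(bit)
--             index += 1
--         else:
--             packets.append(packet)
--             packet = []
--     if len(packet) == packet_length:
--         packets.append(packet)
--     else:
--         for i in range((packet_length - (len(packet)))):
--             packet.append(0)
--         packets.append(packet)
--     return packets
-- ===== SOURCE B (Python) =====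
-- packet_length = 8  # min 4, koduje tylko dla dlugosci 2^n
--
--
-- def make_packets(bits):
--     # Emit at least one packet (A pads an empty input to one all-zero packet).
--     packets = []
--     i = 0
--     n = len(bits)
--     while True:
--         chunk = list(bits[i:i + packet_length])
--         packets.append(chunk + [0] * (packet_length - len(chunk)))
--         i += packet_length
--         if i >= n:
--             break
--     return packets
-- ===== Notes on version B (the rewrite author's own statement) =====
-- stated objective: simpler
-- what changed: Replaces A's bit-by-bit while loop with a dual-purpose accumulator (a packet being filled plus a re-entrant full-packet branch that does not advance the index) and a separate post-loop padding pass by a single do-while that slices one fixed-size chunk per step and pads it in place.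
import Mathlib
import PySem

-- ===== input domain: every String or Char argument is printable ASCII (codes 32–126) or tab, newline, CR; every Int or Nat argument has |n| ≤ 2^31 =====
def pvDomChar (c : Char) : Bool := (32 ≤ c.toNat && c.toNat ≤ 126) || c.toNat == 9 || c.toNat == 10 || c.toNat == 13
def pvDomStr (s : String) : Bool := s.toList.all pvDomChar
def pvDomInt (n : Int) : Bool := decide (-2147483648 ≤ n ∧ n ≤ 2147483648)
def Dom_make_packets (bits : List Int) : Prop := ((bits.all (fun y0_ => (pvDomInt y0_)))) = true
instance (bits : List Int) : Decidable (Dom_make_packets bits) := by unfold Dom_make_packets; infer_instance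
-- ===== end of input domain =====

-- B replaces A's bit-by-bit accumulator while-loop (with its separate post-loop
-- zero-padding pass) by a do-while that slices one fixed-size chunk per step and
-- pads it in place; objective: simpler.

-- ===== PORT A =====
-- A's while loop, state (packets, packet, index); the full-packet branch flushes
-- the packet without advancing the index, exactly as in the Python.
def mpLoopA (bits : List Int) (packets : List (List Int)) (packet : List Int)
    (index : Nat) : List (List Int) × List Int :=
  if h : index < bits.length then
    if packet.length < 8 then
      mpLoopA bits packets (packet ++ [bits[index]]) (index + 1)
    else
      mpLoopA bits (packets ++ [packet]) [] index
  else
    (packets, packet)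
termination_by (bits.length - index, if packet.length < 8 then 0 else 1)
decreasing_by
  · exact Prod.Lex.left _ _ (by omega)
  · exact Prod.Lex.right _ (by simp [*])

def make_packets (bits : List Int) : List (List Int) :=
  let r := mpLoopA bits [] [] 0
  if r.2.length == 8 then
    r.1 ++ [r.2]
  else
    -- 'for i in range(packet_length - len(packet)): packet.append(0)' appends that many 0s
    r.1 ++ [r.2 ++ List.replicate (8 - r.2.length) 0]

-- ===== PORT B =====
-- B's do-while: one slice of up to 8 bits per step, padded in place.
def mpLoopB (bits : List Int) (packets : List (List Int)) (i : Nat) : List (List Int) :=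
  let chunk := PySem.List.slice bits (some (i : Int)) (some ((i + 8 : Nat) : Int))
  let packets' := packets ++ [chunk ++ List.replicate (8 - chunk.length) 0]
  if bits.length ≤ i + 8 then packets'
  else mpLoopB bits packets' (i + 8)
termination_by bits.length - i
decreasing_by omega

def make_packets_alt (bits : List Int) : List (List Int) :=
  mpLoopB bits [] 0

-- ===== PRECONDITION & SPEC =====
def Spec_make_packets (bits : List Int) (out : List (List Int)) : Prop := out = make_packets_alt bits
instance (bits : List Int) (out : List (List Int)) : Decidable (Spec_make_packets bits out) := by unfold Spec_make_packets; infer_instance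

-- ===== CLAIM (what is proved, stated in full; the proofs are below) =====
def Claim_equal_make_packets : Prop := ∀ (bits : List Int), Dom_make_packets bits → Spec_make_packets bits (make_packets bits)

-- ===== LEMMAS AND PROOFS =====

-- Common characterisation: the zero-padded 8-chunks of s (one chunk even for s = []).
def padChunks (s : List Int) : List (List Int) :=
  if s.length ≤ 8 then [s ++ List.replicate (8 - s.length) 0]
  else s.take 8 :: padChunks (s.drop 8)
termination_by s.length
decreasing_by simp; omega

-- A's post-loop finishing step.
def mpFinish (r : List (List Int) × List Int) : List (List Int) :=
  if r.2.length == 8 then r.1 ++ [r.2] else r.1 ++ [r.2 ++ List.replicate (8 - r.2.length) 0]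

lemma mpLoopA_padChunks (bits : List Int) (packets : List (List Int)) (packet : List Int)
    (index : Nat) :
    packet.length ≤ 8 →
    mpFinish (mpLoopA bits packets packet index) = packets ++ padChunks (packet ++ bits.drop index) := by
  induction packets, packet, index using mpLoopA.induct bits with
  | case1 packets packet index h hlt ih =>
    intro hp
    rw [mpLoopA, dif_pos h, if_pos hlt, ih (by simp; omega),
      List.drop_eq_getElem_cons h]
    simp
  | case2 packets packet index h hlt ih =>
    intro hp
    have hp8 : packet.length = 8 := by omega
    rw [mpLoopA, dif_pos h, if_neg hlt, ih (by simp)]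
    have hd : index < bits.length := h
    have hlen : (packet ++ bits.drop index).length > 8 := by
      rw [List.length_append, hp8, List.length_drop]; omega
    conv_rhs => rw [padChunks]
    rw [if_neg (by omega)]
    have ht : (packet ++ bits.drop index).take 8 = packet := by
      rw [← hp8]; exact List.take_left
    have hdr : (packet ++ bits.drop index).drop 8 = bits.drop index := by
      rw [← hp8]; exact List.drop_left
    simp [ht, hdr]
  | case3 packets packet index h =>
    intro hp
    have hd : bits.drop index = [] := List.drop_of_length_le (by omega)
    rw [mpLoopA, dif_neg h, hd, List.append_nil]
    rw [padChunks, if_pos hp, mpFinish]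
    by_cases h8 : packet.length = 8
    · simp [h8]
    · simp [h8]

lemma mpLoopB_padChunks (bits : List Int) (packets : List (List Int)) (i : Nat) :
    mpLoopB bits packets i = packets ++ padChunks (bits.drop i) := by
  induction packets, i using mpLoopB.induct bits with
  | case1 packets i h =>
    have hc : PySem.List.slice bits (some (i : Int)) (some ((i + 8 : Nat) : Int))
        = (bits.drop i).take 8 := by
      rw [PySem.List.slice_natCast]; congr 1; omega
    have hd : (bits.drop i).take 8 = bits.drop i := by
      apply List.take_of_length_le; simp; omega
    rw [mpLoopB]
    simp only [hc, hd, if_pos h]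
    rw [padChunks, if_pos (by simp; omega)]
  | case2 packets i chunk packets' h ih =>
    have hc : PySem.List.slice bits (some (i : Int)) (some ((i + 8 : Nat) : Int))
        = (bits.drop i).take 8 := by
      rw [PySem.List.slice_natCast]; congr 1; omega
    have hlen : ((bits.drop i).take 8).length = 8 := by simp; omega
    rw [mpLoopB]
    simp only [hc, if_neg h]
    simp only [packets', chunk, hc] at ih
    rw [ih]
    conv_rhs => rw [padChunks]
    rw [if_neg (by simp; omega)]
    simp [hlen, List.drop_drop]

-- ===== VERDICT (by name: the statement is the Claim_ definition above) =====
theorem make_packets_spec : Claim_equal_make_packets := by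
  intro bits _
  show make_packets bits = make_packets_alt bits
  have hA : make_packets bits = mpFinish (mpLoopA bits [] [] 0) := by
    rw [make_packets, mpFinish]
  rw [hA, mpLoopA_padChunks bits [] [] 0 (by simp), make_packets_alt,
    mpLoopB_padChunks bits [] 0]
  simp
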